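-- pv_equiv track=rewrite | github.com/karan-batavia/myapp | patent_documents/create_rvo_compliant_docs.py | format_with_line_numbers
-- ===== SOURCE A (Python) =====
-- def format_with_line_numbers(text_lines, start_line=5):
--     """Format text with line numbers at every 5th line"""
--     result = []
--     line_num = start_line
--
--     for i, line in enumerate(text_lines, 1):
--         if i % 5 == 0:
--             result.append(f"{line_num}\t{line}")
--             line_num += 5
--         else:
--             result.append(f"\t{line}")
--
--     return result
-- ===== SOURCE B (Python) =====
-- def format_with_line_numbers(text_lines, start_line=5):
--     """Format text with line numbers at every 5th line: recurse over blocks of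
--     five lines (each full block is four tab-prefixed lines plus the numbered
--     fifth; a trailing partial block is tab-prefixed). Recursion depth is one
--     per five lines, so extremely long inputs can hit Python's recursion limit."""
--     match text_lines:
--         case [a, b, c, d, e, *rest]:
--             return ["\t" + a, "\t" + b, "\t" + c, "\t" + d,
--                     f"{start_line}\t{e}"] + format_with_line_numbers(rest, start_line + 5)
--         case _:
--             return ["\t" + line for line in text_lines]
-- ===== Notes on version B (the rewrite author's own statement) =====
-- stated objective: alternative
-- what changed: Replaces the single indexed loop with a running counter by structural recursion over blocks of five lines: each full block is emitted as four tab-prefixed lines plus a numbered fifth, recursing with start_line + 5, and a trailing partial block is tab-prefixed directly, so no index and no i % 5 test exist; it trades bounded depth for structure (Python's recursion limit caps extremely long inputs).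
import Mathlib
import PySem

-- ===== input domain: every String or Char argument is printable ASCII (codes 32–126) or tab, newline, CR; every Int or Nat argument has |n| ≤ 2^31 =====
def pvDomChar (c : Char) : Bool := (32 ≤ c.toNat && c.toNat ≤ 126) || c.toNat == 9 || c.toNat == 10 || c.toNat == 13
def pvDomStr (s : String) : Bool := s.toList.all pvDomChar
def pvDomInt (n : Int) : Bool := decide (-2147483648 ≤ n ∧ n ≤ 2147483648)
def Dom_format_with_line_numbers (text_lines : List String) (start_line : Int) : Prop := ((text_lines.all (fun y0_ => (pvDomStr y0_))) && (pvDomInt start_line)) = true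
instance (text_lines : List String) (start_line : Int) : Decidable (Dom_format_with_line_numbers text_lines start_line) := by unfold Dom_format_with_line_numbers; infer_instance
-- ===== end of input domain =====

-- ===== PORT A =====
def format_with_line_numbers (text_lines : List String) (start_line : Int) : List String :=
  (((PySem.List.enumerate text_lines 1).foldl
      (fun (st : List String × Int) p =>
        if p.1 % 5 == 0 then
          (st.1 ++ [PySem.Int.toStr st.2 ++ "\t" ++ p.2], st.2 + 5)
        else
          (st.1 ++ ["\t" ++ p.2], st.2))
      ([], start_line))).1

-- ===== PORT B =====
-- B recurses over blocks of five lines (no index, no running counter inside a block):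
-- each full block yields four tab-prefixed lines plus the numbered fifth, then recurses
-- with start_line + 5; a trailing partial block is just tab-prefixed (objective: alternative).
def format_with_line_numbers_alt (text_lines : List String) (start_line : Int) : List String :=
  match text_lines with
  | a :: b :: c :: d :: e :: rest =>
      ["\t" ++ a, "\t" ++ b, "\t" ++ c, "\t" ++ d,
       PySem.Int.toStr start_line ++ "\t" ++ e]
        ++ format_with_line_numbers_alt rest (start_line + 5)
  | other => other.map (fun line => "\t" ++ line)

-- ===== PRECONDITION & SPEC =====
def Spec_format_with_line_numbers (text_lines : List String) (start_line : Int) (out : List String) : Prop := out = format_with_line_numbers_alt text_lines start_line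
instance (text_lines : List String) (start_line : Int) (out : List String) : Decidable (Spec_format_with_line_numbers text_lines start_line out) := by unfold Spec_format_with_line_numbers; infer_instance

-- ===== CLAIM (what is proved, stated in full; the proofs are below) =====
def Claim_equal_format_with_line_numbers : Prop := ∀ (text_lines : List String) (start_line : Int), Dom_format_with_line_numbers text_lines start_line → Spec_format_with_line_numbers text_lines start_line (format_with_line_numbers text_lines start_line)

-- ===== LEMMAS AND PROOFS =====
-- Loop invariant: A's fold, started at any 1-mod-5 index s with accumulator acc and
-- counter sl, appends exactly B's block-recursive result for the remaining lines.
theorem fwln_inv (xs : List String) (sl : Int) : ∀ (s : Int) (acc : List String), s % 5 = 1 →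
    ((PySem.List.enumerate xs s).foldl
      (fun (st : List String × Int) p =>
        if p.1 % 5 == 0 then
          (st.1 ++ [PySem.Int.toStr st.2 ++ "\t" ++ p.2], st.2 + 5)
        else
          (st.1 ++ ["\t" ++ p.2], st.2))
      (acc, sl)).1
    = acc ++ format_with_line_numbers_alt xs sl := by
  induction xs, sl using format_with_line_numbers_alt.induct with
  | case1 sl a b c d e rest ih =>
    intro s acc hs
    simp only [PySem.List.enumerate_cons, List.foldl_cons]
    have h1 : ¬ ((s % 5 : Int) == 0) = true := by simp; omega
    have h2 : ¬ (((s + 1) % 5 : Int) == 0) = true := by simp; omega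
    have h3 : ¬ (((s + 1 + 1) % 5 : Int) == 0) = true := by simp; omega
    have h4 : ¬ (((s + 1 + 1 + 1) % 5 : Int) == 0) = true := by simp; omega
    have h5 : (((s + 1 + 1 + 1 + 1) % 5 : Int) == 0) = true := by simp; omega
    simp only [h1, h2, h3, h4, h5, if_true, if_false, Bool.false_eq_true]
    rw [ih (s + 1 + 1 + 1 + 1 + 1) _ (by omega)]
    simp [format_with_line_numbers_alt]
  | case2 sl xs h =>
    intro s acc hs
    have h1 : ¬ (5:Int) ∣ s := by omega
    have h2 : ¬ (5:Int) ∣ (s + 1) := by omega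
    have h3 : ¬ (5:Int) ∣ (s + 1 + 1) := by omega
    have h4 : ¬ (5:Int) ∣ (s + 1 + 1 + 1) := by omega
    match xs, h with
    | [], _ => simp [PySem.List.enumerate_nil, format_with_line_numbers_alt]
    | [a], _ =>
      simp [PySem.List.enumerate_cons, PySem.List.enumerate_nil, h1,
            format_with_line_numbers_alt]
    | [a, b], _ =>
      simp [PySem.List.enumerate_cons, PySem.List.enumerate_nil, h1, h2,
            format_with_line_numbers_alt]
    | [a, b, c], _ =>
      simp [PySem.List.enumerate_cons, PySem.List.enumerate_nil, h1, h2, h3,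
            format_with_line_numbers_alt]
    | [a, b, c, d], _ =>
      simp [PySem.List.enumerate_cons, PySem.List.enumerate_nil, h1, h2, h3, h4,
            format_with_line_numbers_alt]
    | a :: b :: c :: d :: e :: rest, h => exact (h a b c d e rest rfl).elim

-- ===== VERDICT (by name: the statement is the Claim_ definition above) =====
theorem format_with_line_numbers_spec : Claim_equal_format_with_line_numbers := by
  intro text_lines start_line _
  unfold Spec_format_with_line_numbers format_with_line_numbers
  simpa using fwln_inv text_lines start_line 1 [] (by norm_num)
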